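-- pv_equiv track=rewrite | github.com/francescogoia/Lab07 | model/model.py | aggiungi_costi
-- ===== SOURCE A (Python) =====
-- def aggiungi_costi(parziale):               # parziale è una lista di tuple (localita, data, umidita)
--     costo_tot = 0
--     for i in range(len(parziale)):
--         costo_var = parziale[i][2]
--         costo_maggiorato = 0
--         if i <= 1:
--             costo_maggiorato = 0
--         else:
--             if parziale[i][0] != parziale[i - 1][0] or parziale[i - 1][0] != parziale[i - 2][0]:
--                 costo_maggiorato = 100
--         costi = costo_var + costo_maggiorato
--         costo_tot += costi
--
--     return costo_tot, parziale
-- ===== SOURCE B (Python) =====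
-- def aggiungi_costi(parziale):
--     n = len(parziale)
--     total = sum(t[2] for t in parziale)
--     if n > 2:
--         # run-length encode consecutive equal locations
--         run_lengths = []
--         run = 1
--         for prev, cur in zip(parziale, parziale[1:]):
--             if cur[0] == prev[0]:
--                 run += 1
--             else:
--                 run_lengths.append(run)
--                 run = 1
--         run_lengths.append(run)
--         # within a run of length L, exactly max(L-2,0) elements escape the surcharge
--         total += 100 * ((n - 2) - sum(max(L - 2, 0) for L in run_lengths))
--     return total, parziale
-- ===== Notes on version B (the rewrite author's own statement) =====
-- stated objective: alternative
-- what changed: Replaces the index loop with per-element lookback by run-length encoding the consecutive equal-location runs and a closed-form per-run formula: surcharge = 100 * ((n-2) - sum(max(L-2,0) over runs)), since within a run of length L exactly max(L-2,0) elements escape the surcharge.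
import Mathlib
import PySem

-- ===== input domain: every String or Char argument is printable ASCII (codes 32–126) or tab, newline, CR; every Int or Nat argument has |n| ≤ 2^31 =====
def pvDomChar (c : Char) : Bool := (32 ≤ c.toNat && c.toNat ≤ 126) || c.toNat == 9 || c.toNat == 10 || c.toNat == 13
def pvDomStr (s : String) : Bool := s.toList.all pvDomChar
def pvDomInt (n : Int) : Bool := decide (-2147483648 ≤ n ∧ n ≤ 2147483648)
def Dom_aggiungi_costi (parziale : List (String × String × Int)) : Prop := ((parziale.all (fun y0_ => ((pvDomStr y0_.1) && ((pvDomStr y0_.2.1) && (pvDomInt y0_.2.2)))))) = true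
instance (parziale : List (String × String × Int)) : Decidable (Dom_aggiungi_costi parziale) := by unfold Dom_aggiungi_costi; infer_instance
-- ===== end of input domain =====

-- B replaces A's index loop with per-element lookback by run-length encoding the consecutive
-- equal-location runs and a closed-form per-run surcharge formula (objective: alternative algorithm).

-- ===== PORT A =====
-- literal port of A's index loop; parziale[i] etc. via pyGetD (indices are always in range here)
def aggiungi_costi (parziale : List (String × String × Int)) : Int × (List (String × String × Int)) :=
  let costo_tot : Int :=
    (PySem.List.pyRange 0 (parziale.length : Int) 1).foldl (fun costo_tot i =>
      let costo_var := (PySem.List.pyGetD parziale i ("", "", 0)).2.2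
      let costo_maggiorato : Int :=
        if i ≤ 1 then 0
        else
          if (PySem.List.pyGetD parziale i ("", "", 0)).1 ≠ (PySem.List.pyGetD parziale (i - 1) ("", "", 0)).1 ∨
             (PySem.List.pyGetD parziale (i - 1) ("", "", 0)).1 ≠ (PySem.List.pyGetD parziale (i - 2) ("", "", 0)).1 then 100
          else 0
      let costi := costo_var + costo_maggiorato
      costo_tot + costi) 0
  (costo_tot, parziale)

-- ===== PORT B =====
-- run-length encoding of consecutive equal locations (the fold over zip(parziale, parziale[1:])),
-- then the closed-form surcharge 100 * ((n-2) - sum of max(L-2,0) over the run lengths)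
def aggiungi_costi_alt (parziale : List (String × String × Int)) : Int × (List (String × String × Int)) :=
  let n : Int := (parziale.length : Int)
  let total : Int := (parziale.map (fun t => t.2.2)).sum
  let total : Int :=
    if n > 2 then
      let st := (parziale.zip (parziale.drop 1)).foldl
        (fun (st : List Int × Int) pc =>
          if pc.2.1 == pc.1.1 then (st.1, st.2 + 1) else (st.1 ++ [st.2], (1 : Int)))
        ([], 1)
      let run_lengths := st.1 ++ [st.2]
      total + 100 * ((n - 2) - (run_lengths.map (fun L => max (L - 2) 0)).sum)
    else total
  (total, parziale)

-- ===== PRECONDITION & SPEC =====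
def Spec_aggiungi_costi (parziale : List (String × String × Int)) (out : Int × (List (String × String × Int))) : Prop := out = aggiungi_costi_alt parziale
instance (parziale : List (String × String × Int)) (out : Int × (List (String × String × Int))) : Decidable (Spec_aggiungi_costi parziale out) := by unfold Spec_aggiungi_costi; infer_instance

-- ===== CLAIM (what is proved, stated in full; the proofs are below) =====
def Claim_equal_aggiungi_costi : Prop := ∀ (parziale : List (String × String × Int)), Dom_aggiungi_costi parziale → Spec_aggiungi_costi parziale (aggiungi_costi parziale)

-- ===== LEMMAS AND PROOFS =====

-- the sliding-window surcharge counts (characterisation of A's loop)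
def pvBadW (l : List (String × String × Int)) : Nat :=
  (l.zip ((l.drop 1).zip (l.drop 2))).countP (fun w => !(w.1.1 == w.2.1.1 && w.2.1.1 == w.2.2.1))

def pvGoodW (l : List (String × String × Int)) : Nat :=
  (l.zip ((l.drop 1).zip (l.drop 2))).countP (fun w => w.1.1 == w.2.1.1 && w.2.1.1 == w.2.2.1)

-- run-length recursion extracted from B's fold: x = previous element, r = current run length
def pvG (x : String × String × Int) (t : List (String × String × Int)) (r : Int) : Int :=
  match t with
  | [] => max (r - 2) 0
  | y :: t' => if y.1 == x.1 then pvG y t' (r + 1) else max (r - 2) 0 + pvG y t' 1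

theorem pv_map_getD_range {α : Type} (l : List α) (d : α) :
    (List.range l.length).map (fun k => l.getD k d) = l := by
  apply List.ext_getElem
  · simp
  · intro i h1 h2
    simp [List.getD_eq_getElem?_getD, h2]

theorem pv_sum_ite_100 {α : Type} (L : List α) (p : α → Prop) [DecidablePred p] :
    (L.map (fun x => if p x then (100 : Int) else 0)).sum
      = 100 * ((L.countP (fun x => decide (p x)) : Nat) : Int) := by
  induction L with
  | nil => simp
  | cons x t ih =>
    by_cases h : p x <;> simp [h, ih]
    ring

theorem pv_windows_eq {α : Type} (l : List α) (d : α) :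
    l.zip ((l.drop 1).zip (l.drop 2))
      = (List.range (l.length - 2)).map
          (fun j => (l.getD j d, l.getD (j + 1) d, l.getD (j + 2) d)) := by
  apply List.ext_getElem
  · simp; omega
  · intro i h1 h2
    have hlen : i < l.length - 2 := by simpa using h2
    have hi0 : i < l.length := by omega
    have hi1 : i + 1 < l.length := by omega
    have hi2 : i + 2 < l.length := by omega
    simp [List.getElem_zip, List.getElem_drop, List.getD_eq_getElem?_getD,
      hi0, hi1, hi2, Nat.add_comm]

theorem pv_sum_range_shift (n : Nat) (f : Nat → Int) (h0 : f 0 = 0) (h1 : f 1 = 0) :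
    ((List.range n).map f).sum = ((List.range (n - 2)).map (fun j => f (j + 2))).sum := by
  rcases Nat.lt_or_ge n 2 with h | h
  · interval_cases n
    · simp
    · simp [h0]
  · have hn : n = 2 + (n - 2) := by omega
    rw [hn, List.range_add]
    simp [List.range_succ, h0, h1, Function.comp_def, Nat.add_comm]

-- A's loop computes base + 100 * (number of windows whose locations are not all equal)
theorem pv_A_eq (l : List (String × String × Int)) :
    aggiungi_costi l = ((l.map (fun t => t.2.2)).sum + 100 * ((pvBadW l : Nat) : Int), l) := by
  unfold aggiungi_costi pvBadW
  refine Prod.ext ?_ rfl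
  simp only
  rw [PySem.List.pyRange_one]
  simp only [sub_zero, Int.toNat_natCast, zero_add, List.foldl_map]
  rw [PySem.List.foldl_add, zero_add]
  have hpt : ∀ k ∈ List.range l.length,
      ((PySem.List.pyGetD l (k : Int) ("", "", (0 : Int))).2.2 +
        if (k : Int) ≤ 1 then 0
        else
          if (PySem.List.pyGetD l (k : Int) ("", "", (0 : Int))).1 ≠ (PySem.List.pyGetD l ((k : Int) - 1) ("", "", (0 : Int))).1 ∨
             (PySem.List.pyGetD l ((k : Int) - 1) ("", "", (0 : Int))).1 ≠ (PySem.List.pyGetD l ((k : Int) - 2) ("", "", (0 : Int))).1 then (100 : Int)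
          else 0)
      = ((l.getD k ("", "", (0 : Int))).2.2 +
        if 2 ≤ k ∧ ((l.getD k ("", "", (0 : Int))).1 ≠ (l.getD (k - 1) ("", "", (0 : Int))).1 ∨
            (l.getD (k - 1) ("", "", (0 : Int))).1 ≠ (l.getD (k - 2) ("", "", (0 : Int))).1) then (100 : Int) else 0) := by
    intro k _
    by_cases h2 : k ≤ 1
    · have hki : ((k : Int)) ≤ 1 := by exact_mod_cast h2
      rw [if_pos hki, if_neg (fun h => absurd h.1 (by omega))]
      simp only [PySem.List.pyGetD_natCast]
    · have hki : ¬ ((k : Int)) ≤ 1 := by exact_mod_cast h2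
      have hc1 : ((k : Int)) - 1 = ((k - 1 : Nat) : Int) := by omega
      have hc2 : ((k : Int)) - 2 = ((k - 2 : Nat) : Int) := by omega
      have h2k : 2 ≤ k := by omega
      rw [if_neg hki, hc1, hc2]
      simp only [PySem.List.pyGetD_natCast, h2k, true_and]
  rw [List.map_congr_left hpt, PySem.List.sum_map_add_int]
  have hbase : (List.range l.length).map (fun k => (l.getD k ("", "", (0 : Int))).2.2) = l.map (fun t => t.2.2) := by
    conv_rhs => rw [← pv_map_getD_range l ("", "", (0 : Int))]
    rw [List.map_map]
    rfl
  rw [hbase]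
  congr 1
  rw [pv_sum_range_shift l.length _ (by simp) (by simp)]
  have hsh : ∀ j ∈ List.range (l.length - 2),
      (if 2 ≤ j + 2 ∧ ((l.getD (j + 2) ("", "", (0 : Int))).1 ≠ (l.getD (j + 2 - 1) ("", "", (0 : Int))).1 ∨
          (l.getD (j + 2 - 1) ("", "", (0 : Int))).1 ≠ (l.getD (j + 2 - 2) ("", "", (0 : Int))).1) then (100 : Int) else 0)
      = (if ((l.getD (j + 2) ("", "", (0 : Int))).1 ≠ (l.getD (j + 1) ("", "", (0 : Int))).1 ∨
          (l.getD (j + 1) ("", "", (0 : Int))).1 ≠ (l.getD j ("", "", (0 : Int))).1) then (100 : Int) else 0) := by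
    intro j _
    have he1 : j + 2 - 1 = j + 1 := by omega
    have he2 : j + 2 - 2 = j := by omega
    rw [he1, he2]
    have h2j : 2 ≤ j + 2 := by omega
    simp [h2j]
  rw [List.map_congr_left hsh,
    pv_sum_ite_100 (List.range (l.length - 2))
      (fun j => (l.getD (j + 2) ("", "", (0 : Int))).1 ≠ (l.getD (j + 1) ("", "", (0 : Int))).1 ∨
          (l.getD (j + 1) ("", "", (0 : Int))).1 ≠ (l.getD j ("", "", (0 : Int))).1),
    pv_windows_eq l ("", "", (0 : Int)), List.countP_map]
  congr 1
  norm_cast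
  apply List.countP_congr
  intro j _
  simp only [Function.comp_def, Bool.not_and, Bool.not_eq_true', beq_eq_false_iff_ne,
    Bool.or_eq_true, ne_eq, decide_eq_true_eq]
  constructor <;> rintro (h | h)
  · exact Or.inr fun e => h e.symm
  · exact Or.inl fun e => h e.symm
  · exact Or.inr fun e => h e.symm
  · exact Or.inl fun e => h e.symm

-- B's fold state, summed, equals pvG
theorem pv_fold_g (t : List (String × String × Int)) :
    ∀ (x : String × String × Int) (rl : List Int) (r : Int),
    (let st := ((x :: t).zip t).foldl
        (fun (st : List Int × Int) pc =>
          if pc.2.1 == pc.1.1 then (st.1, st.2 + 1) else (st.1 ++ [st.2], (1 : Int)))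
        (rl, r)
     ((st.1 ++ [st.2]).map (fun L => max (L - 2) 0)).sum)
      = (rl.map (fun L => max (L - 2) 0)).sum + pvG x t r := by
  induction t with
  | nil => intro x rl r; simp [pvG]
  | cons y t' ih =>
    intro x rl r
    by_cases h : y.1 = x.1
    · simpa [List.zip_cons_cons, h, pvG] using ih y rl (r + 1)
    · have hb : (y.1 == x.1) = false := by simp [h]
      simp only [List.zip_cons_cons, List.foldl_cons, hb, Bool.false_eq_true, if_false, pvG]
      rw [ih y (rl ++ [r]) 1]
      simp [add_assoc]

-- shifting the run-length argument of pvG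
def pvLead (k : String) (t : List (String × String × Int)) : Int :=
  ((t.takeWhile (fun y => y.1 == k)).length : Int)

theorem pvG_nil (x : String × String × Int) (r : Int) : pvG x [] r = max (r - 2) 0 := rfl

theorem pvG_cons (x y : String × String × Int) (t' : List (String × String × Int)) (r : Int) :
    pvG x (y :: t') r = if y.1 == x.1 then pvG y t' (r + 1) else max (r - 2) 0 + pvG y t' 1 := rfl

theorem pvLead_nonneg (k : String) (t : List (String × String × Int)) : 0 ≤ pvLead k t := by
  simp [pvLead]

theorem pv_g_shift (t : List (String × String × Int)) :
    ∀ (x : String × String × Int) (r : Int), 1 ≤ r →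
    pvG x t r = pvG x t 1 + (max (pvLead x.1 t + r - 2) 0 - max (pvLead x.1 t - 1) 0) := by
  induction t with
  | nil =>
    intro x r hr
    simp only [pvG_nil, pvLead, List.takeWhile_nil, List.length_nil, Nat.cast_zero]
    omega
  | cons y t' ih =>
    intro x r hr
    by_cases h : y.1 = x.1
    · have hb : (y.1 == x.1) = true := by simp [h]
      have hx : x.1 = y.1 := h.symm
      rw [pvG_cons, pvG_cons, hb, if_pos rfl, if_pos rfl, hx]
      have hl : pvLead y.1 (y :: t') = 1 + pvLead y.1 t' := by
        simp [pvLead]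
        omega
      rw [hl, ih y (r + 1) (by omega), ih y (1 + 1) (by omega)]
      have hL : 0 ≤ pvLead y.1 t' := pvLead_nonneg y.1 t'
      omega
    · have hb : (y.1 == x.1) = false := by simp [h]
      rw [pvG_cons, pvG_cons, hb]
      simp only [Bool.false_eq_true, if_false]
      have hl : pvLead x.1 (y :: t') = 0 := by
        simp [pvLead, hb]
      rw [hl]
      omega

-- pvG at run length 1 counts the all-equal windows
theorem pv_g_good (t : List (String × String × Int)) :
    ∀ (x : String × String × Int), pvG x t 1 = ((pvGoodW (x :: t) : Nat) : Int) := by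
  induction t with
  | nil => intro x; simp [pvG_nil, pvGoodW]
  | cons y t' ih =>
    intro x
    cases t' with
    | nil =>
      have hg : pvGoodW [x, y] = 0 := rfl
      rw [pvG_cons, hg]
      by_cases h : y.1 = x.1
      · simp [h, pvG_nil]
      · simp [h, pvG_nil]
    | cons z t'' =>
      have hwin : pvGoodW (x :: y :: z :: t'')
          = (if x.1 == y.1 && y.1 == z.1 then 1 else 0) + pvGoodW (y :: z :: t'') := by
        simp only [pvGoodW, List.drop_succ_cons, List.drop_zero, List.zip_cons_cons,
          List.countP_cons]
        split <;> omega
      rw [hwin, pvG_cons]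
      by_cases h : y.1 = x.1
      · have hb : (y.1 == x.1) = true := by simp [h]
        rw [hb, if_pos rfl]
        rw [pv_g_shift (z :: t'') y (1 + 1) (by omega), ih y]
        have hL : 0 ≤ pvLead y.1 t'' := pvLead_nonneg y.1 t''
        by_cases hz : z.1 = y.1
        · have hbz : (z.1 == y.1) = true := by simp [hz]
          have hl : pvLead y.1 (z :: t'') = 1 + pvLead y.1 t'' := by
            simp [pvLead, hbz]
            omega
          have hind : (x.1 == y.1 && y.1 == z.1) = true := by
            simp [h.symm, hz.symm]
          rw [hl, hind, if_pos rfl]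
          push_cast
          omega
        · have hbz : (z.1 == y.1) = false := by simp [hz]
          have hl : pvLead y.1 (z :: t'') = 0 := by
            simp [pvLead, hbz]
          have hyz : y.1 ≠ z.1 := fun e => hz e.symm
          have hind : (x.1 == y.1 && y.1 == z.1) = false := by simp [hyz]
          rw [hl, hind]
          simp only [Bool.false_eq_true, if_false]
          push_cast
          omega
      · have hb : (y.1 == x.1) = false := by simp [h]
        have hxy : x.1 ≠ y.1 := fun e => h e.symm
        have hind : (x.1 == y.1 && y.1 == z.1) = false := by simp [hxy]
        rw [hb, hind]
        simp only [Bool.false_eq_true, if_false]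
        rw [ih y]
        push_cast
        omega

theorem pv_bad_add_good (l : List (String × String × Int)) :
    pvBadW l + pvGoodW l = l.length - 2 := by
  unfold pvBadW pvGoodW
  have h := List.length_eq_countP_add_countP
    (p := fun (w : (String × String × Int) × (String × String × Int) × (String × String × Int)) =>
      w.1.1 == w.2.1.1 && w.2.1.1 == w.2.2.1)
    (l := l.zip ((l.drop 1).zip (l.drop 2)))
  simp only [Bool.not_eq_true] at h
  have hc : List.countP
        (fun (a : (String × String × Int) × (String × String × Int) × (String × String × Int)) =>
          decide ((a.1.1 == a.2.1.1 && a.2.1.1 == a.2.2.1) = false))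
        (l.zip ((l.drop 1).zip (l.drop 2)))
      = List.countP (fun w => !(w.1.1 == w.2.1.1 && w.2.1.1 == w.2.2.1))
        (l.zip ((l.drop 1).zip (l.drop 2))) :=
    List.countP_congr (fun a _ => by
      cases (a.1.1 == a.2.1.1 && a.2.1.1 == a.2.2.1) <;> simp)
  rw [hc] at h
  have hlen : (l.zip ((l.drop 1).zip (l.drop 2))).length = l.length - 2 := by
    simp [List.length_zip, List.length_drop]
    omega
  omega

-- ===== VERDICT (by name: the statement is the Claim_ definition above) =====
theorem aggiungi_costi_spec : Claim_equal_aggiungi_costi := by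
  intro l _
  unfold Spec_aggiungi_costi
  rw [pv_A_eq]
  unfold aggiungi_costi_alt
  refine Prod.ext ?_ rfl
  simp only
  by_cases hn : ((l.length : Int)) > 2
  · rw [if_pos hn]
    cases l with
    | nil => simp at hn
    | cons x t =>
      have hfold := pv_fold_g t x [] 1
      simp only [List.drop_one, List.tail_cons] at *
      rw [hfold]
      rw [pv_g_good t x]
      have hbg := pv_bad_add_good (x :: t)
      have hlen : 3 ≤ (x :: t).length := by
        simp only [List.length_cons] at hn ⊢
        omega
      have hcast : ((pvBadW (x :: t) : Nat) : Int)
          = (((x :: t).length : Int) - 2) - ((pvGoodW (x :: t) : Nat) : Int) := by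
        have : pvBadW (x :: t) + pvGoodW (x :: t) = (x :: t).length - 2 := hbg
        omega
      rw [hcast]
      simp only [List.map_nil, List.sum_nil, zero_add]
  · rw [if_neg hn]
    have hwin : l.zip ((l.drop 1).zip (l.drop 2)) = [] := by
      have : l.drop 2 = [] := List.drop_eq_nil_of_le (by omega)
      simp [this]
    have hbad : pvBadW l = 0 := by
      unfold pvBadW
      rw [hwin]
      rfl
    rw [hbad]
    simp
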